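-- pv_equiv track=rewrite | github.com/ssgdla/HuffmanLZW | functions.py | reconstructRLC
-- ===== SOURCE A (Python) =====
-- def reconstructRLC(medianCode):
--     result = []
--     result.append(medianCode[1])
--     length = len(medianCode)
--     for i in range(2,length,3):
--         if (i+2)<length:
--             result.append(medianCode[i])
--             result.append(medianCode[i+2])
--     result.append('EOB')
--     return result
-- ===== SOURCE B (Python) =====
-- def reconstructRLC(medianCode):
--     s1 = medianCode[2::3]
--     s2 = medianCode[4::3]
--     result = [medianCode[1]]
--     for a, b in zip(s1, s2):
--         result += [a, b]
--     result.append('EOB')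
--     return result
-- ===== Notes on version B (the rewrite author's own statement) =====
-- stated objective: idiomatic
-- what changed: Replaces the index-arithmetic range(2,length,3) loop with a bounds-check inside by a paired traversal of two precomputed strided slices medianCode[2::3] and medianCode[4::3] zipped together, where zip's truncation replaces the i+2<length guard.
import Mathlib
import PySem

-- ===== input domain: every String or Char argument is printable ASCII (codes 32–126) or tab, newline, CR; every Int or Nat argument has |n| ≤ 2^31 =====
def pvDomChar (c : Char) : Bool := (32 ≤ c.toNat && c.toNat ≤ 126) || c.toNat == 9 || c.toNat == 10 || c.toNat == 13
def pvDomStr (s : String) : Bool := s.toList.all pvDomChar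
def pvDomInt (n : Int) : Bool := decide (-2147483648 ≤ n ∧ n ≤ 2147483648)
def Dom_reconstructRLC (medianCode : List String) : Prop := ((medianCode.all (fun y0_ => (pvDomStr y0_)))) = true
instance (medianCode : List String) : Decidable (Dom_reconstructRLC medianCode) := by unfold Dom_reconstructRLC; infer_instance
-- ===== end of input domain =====

-- B replaces A's strided index loop with a zip over two precomputed slices (idiomatic decomposition; return value only, no mutation visible to the caller).

-- ===== PORT A =====
-- literal port of A: result=[medianCode[1]]; for i in range(2,length,3): if i+2<length: append medianCode[i], medianCode[i+2]; append 'EOB'.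
-- pyGet? … .getD "" : the default is never used inside Pre_ (index 1 in range, loop guard keeps i, i+2 in range).
def reconstructRLC (medianCode : List String) : List String :=
  let result : List String := []
  let result := result ++ [(PySem.List.pyGet? medianCode 1).getD ""]
  let length : Int := medianCode.length
  let result := (PySem.List.pyRange 2 length 3).foldl
    (fun r i =>
      if i + 2 < length then
        (r ++ [(PySem.List.pyGet? medianCode i).getD ""]) ++ [(PySem.List.pyGet? medianCode (i + 2)).getD ""]
      else r) result
  result ++ ["EOB"]

-- ===== PORT B =====
-- literal port of Source B: s1 = medianCode[2::3]; s2 = medianCode[4::3]; fold over zip s1 s2 extending by the pair.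
def reconstructRLC_alt (medianCode : List String) : List String :=
  let s1 := (PySem.List.slice? medianCode (some 2) none 3).getD []
  let s2 := (PySem.List.slice? medianCode (some 4) none 3).getD []
  let result := [(PySem.List.pyGet? medianCode 1).getD ""]
  let result := (s1.zip s2).foldl (fun r p => r ++ [p.1, p.2]) result
  result ++ ["EOB"]

-- ===== PRECONDITION & SPEC =====
-- Pre_ excludes lists of fewer than two elements, on which A raises IndexError at medianCode[1] (B raises there too).
def Pre_reconstructRLC (medianCode : List String) : Prop := 2 ≤ medianCode.length
instance (medianCode : List String) : Decidable (Pre_reconstructRLC medianCode) := by unfold Pre_reconstructRLC; infer_instance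
def pvWitness_reconstructRLC : List String := ["3", "0110", "2", "x", "101", "0", "y", "11"]
def Spec_reconstructRLC (medianCode : List String) (out : List String) : Prop := out = reconstructRLC_alt medianCode
instance (medianCode : List String) (out : List String) : Decidable (Spec_reconstructRLC medianCode out) := by unfold Spec_reconstructRLC; infer_instance

-- ===== CLAIM (what is proved, stated in full; the proofs are below) =====
def Claim_equal_reconstructRLC : Prop := ∀ (medianCode : List String), Dom_reconstructRLC medianCode → Pre_reconstructRLC medianCode → Spec_reconstructRLC medianCode (reconstructRLC medianCode)

-- ===== LEMMAS AND PROOFS =====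

def pvP (m : List String) (k : Nat) : List String :=
  [(m[2+3*k]?).getD "", (m[4+3*k]?).getD ""]

theorem flatMap_range_ite {α : Type} (P : Nat → List α) (n c : Nat) (h : n ≤ c) :
    (List.range c).flatMap (fun k => if k < n then P k else []) = (List.range n).flatMap P := by
  rw [show c = n + (c-n) by omega, List.range_add, List.flatMap_append, List.flatMap_map]
  have h2 : (List.range (c-n)).flatMap (fun x => if n + x < n then P (n + x) else []) = [] := by
    rw [List.flatMap_eq_nil_iff]; intro k _; rw [if_neg (by omega)]
  rw [h2, List.append_nil]
  apply List.flatMap_congr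
  intro k hk
  rw [if_pos (List.mem_range.mp hk)]

theorem midA (m : List String) (init : List String) (h : 2 ≤ m.length) :
    (PySem.List.pyRange 2 (m.length : Int) 3).foldl
      (fun r i =>
        if i + 2 < (m.length : Int) then
          (r ++ [(PySem.List.pyGet? m i).getD ""]) ++ [(PySem.List.pyGet? m (i + 2)).getD ""]
        else r) init
    = init ++ (List.range ((m.length - 2)/3)).flatMap (pvP m) := by
  rw [PySem.List.foldl_congr_mem _ _
      (fun r i => r ++ (if i + 2 < (m.length : Int) then
        [(PySem.List.pyGet? m i).getD "", (PySem.List.pyGet? m (i + 2)).getD ""] else [])) _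
      (by intro acc x _; by_cases hx : x + 2 < (m.length : Int) <;> simp [hx])]
  rw [PySem.List.foldl_append_eq_flatMap]
  congr 1
  rw [PySem.List.pyRange_of_pos 2 (m.length : Int) (by norm_num), List.flatMap_map]
  have hc : (if (2:Int) < m.length then (((m.length:Int) - 2 + 3 - 1) / 3).toNat else 0) = m.length / 3 := by
    split <;> omega
  rw [hc]
  have hF : ∀ k : Nat, (if 2 + 3 * (k:Int) + 2 < (m.length:Int) then
      [(PySem.List.pyGet? m (2 + 3 * (k:Int))).getD "", (PySem.List.pyGet? m (2 + 3 * (k:Int) + 2)).getD ""]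
      else []) = (if k < (m.length - 2)/3 then pvP m k else []) := by
    intro k
    by_cases hk : k < (m.length - 2)/3
    · rw [if_pos (by omega), if_pos hk]
      unfold pvP
      have e1 : (2 + 3 * (k:Int)) = ((2+3*k : Nat) : Int) := by push_cast; ring
      have e2 : (2 + 3 * (k:Int) + 2) = ((4+3*k : Nat) : Int) := by push_cast; ring
      rw [e2, e1, PySem.List.pyGet?_natCast, PySem.List.pyGet?_natCast]
    · rw [if_neg (by omega), if_neg hk]
  calc (List.range (m.length/3)).flatMap (fun (k : Nat) => if 2 + 3 * (k:Int) + 2 < (m.length:Int) then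
          [(PySem.List.pyGet? m (2 + 3 * (k:Int))).getD "", (PySem.List.pyGet? m (2 + 3 * (k:Int) + 2)).getD ""]
          else [])
      = (List.range (m.length/3)).flatMap (fun (k : Nat) => if k < (m.length - 2)/3 then pvP m k else []) := by
        apply List.flatMap_congr; intro k _; exact hF k
    _ = (List.range ((m.length - 2)/3)).flatMap (pvP m) := flatMap_range_ite _ _ _ (by omega)

theorem s1_eq (m : List String) (h : 2 ≤ m.length) :
    (PySem.List.slice? m (some 2) none 3).getD []
    = (List.range (m.length/3)).map (fun k => (m[2+3*k]?).getD "") := by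
  simp only [PySem.List.slice?, PySem.List.sliceIndices]
  norm_num
  rw [show min 2 (m.length:Int) = 2 by omega]
  have hc : (if 2 < m.length then (((m.length:Int) - 2 + 3 - 1) / 3).toNat else 0) = m.length / 3 := by
    split <;> omega
  rw [hc]
  rw [List.filterMap_congr (g := fun k => some ((m[2+3*k]?).getD ""))
      (by
        intro k hk
        have hk' := List.mem_range.mp hk
        have hi : (2 + 3 * (k:Int)).toNat = 2 + 3*k := by omega
        rw [hi]
        have hlt : 2 + 3*k < m.length := by omega
        simp [List.getElem?_eq_getElem hlt])]
  rw [show (fun (k:Nat) => some ((m[2+3*k]?).getD "")) = some ∘ (fun (k:Nat) => (m[2+3*k]?).getD "") from rfl,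
     List.filterMap_eq_map]

theorem s2_eq (m : List String) (h : 2 ≤ m.length) :
    (PySem.List.slice? m (some 4) none 3).getD []
    = (List.range ((m.length-2)/3)).map (fun k => (m[4+3*k]?).getD "") := by
  simp only [PySem.List.slice?, PySem.List.sliceIndices]
  norm_num
  by_cases h4 : 4 < m.length
  · rw [show min 4 (m.length:Int) = 4 by omega]
    have hc : (if 4 < m.length then (((m.length:Int) - 4 + 3 - 1) / 3).toNat else 0) = (m.length-2) / 3 := by
      split <;> omega
    rw [hc]
    rw [List.filterMap_congr (g := fun k => some ((m[4+3*k]?).getD ""))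
        (by
          intro k hk
          have hk' := List.mem_range.mp hk
          have hi : (4 + 3 * (k:Int)).toNat = 4 + 3*k := by omega
          rw [hi]
          have hlt : 4 + 3*k < m.length := by omega
          simp [List.getElem?_eq_getElem hlt])]
    rw [show (fun (k:Nat) => some ((m[4+3*k]?).getD "")) = some ∘ (fun (k:Nat) => (m[4+3*k]?).getD "") from rfl,
       List.filterMap_eq_map]
  · rw [show min 4 (m.length:Int) = m.length by omega]
    rw [if_neg (by omega), show (m.length-2)/3 = 0 by omega]
    simp

theorem midB (m : List String) (init : List String) (h : 2 ≤ m.length) :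
    (((PySem.List.slice? m (some 2) none 3).getD []).zip
      ((PySem.List.slice? m (some 4) none 3).getD [])).foldl (fun r p => r ++ [p.1, p.2]) init
    = init ++ (List.range ((m.length - 2)/3)).flatMap (pvP m) := by
  rw [s1_eq m h, s2_eq m h]
  rw [show m.length/3 = (m.length-2)/3 + (m.length/3 - (m.length-2)/3) by omega,
      List.range_add, List.map_append,
      ← List.append_nil (List.map (fun k => (m[4+3*k]?).getD "") (List.range ((m.length-2)/3))),
      List.zip_append (by simp), List.zip_nil_right, List.append_nil, List.zip_map']
  rw [PySem.List.foldl_append_eq_flatMap, List.flatMap_map]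
  rfl

theorem reconstructRLC_main : ∀ (medianCode : List String), 2 ≤ medianCode.length → reconstructRLC medianCode = reconstructRLC_alt medianCode := by
  intro m h
  unfold reconstructRLC reconstructRLC_alt
  dsimp only
  rw [midA m _ h, midB m _ h]
  simp

-- ===== VERDICT (by name: the statement is the Claim_ definition above) =====
theorem reconstructRLC_spec : Claim_equal_reconstructRLC := by
  intro m _ hpre
  exact reconstructRLC_main m hpre
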